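-- pv_equiv track=rewrite | github.com/The-Elfinator/python-SDA | 03.1.FunctionsStringsIO/tasks/count_util/count_util.py | count_util
-- ===== SOURCE A (Python) =====
-- def count_util(text: str, flags: str | None = None) -> dict[str, int]:
--     """
--     :param text: text to count entities
--     :param flags: flags in command-like format - can be:
--         * -m stands for counting characters
--         * -l stands for counting lines
--         * -L stands for getting length of the longest line
--         * -w stands for counting words
--     More than one flag can be passed at the same time, for example:
--         * "-l -m"
--         * "-lLw"
--     Omitting flags or passing empty string is equivalent to "-mlLw"
--     :return: mapping from string keys to corresponding counter, where
--     keys are selected according to the received flags: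
--         * "chars" - amount of characters
--         * "lines" - amount of lines
--         * "longest_line" - the longest line length
--         * "words" - amount of words
--     """
--     ret: dict[str, int] = {}
--     characters_flag = "m"
--     characters_key_word = "chars"
--     lines_flag = "l"
--     lines_key_word = "lines"
--     longest_flag = "L"
--     longest_key_word = "longest_line"
--     words_flag = "w"
--     words_key_word = "words"
--     default_flags = "-m -l -L -w"
--     for flag in flags.split() if flags is not None and len(flags) != 0 else default_flags.split():
--         for k in flag[1:]:
--             if k == characters_flag:
--                 ret[characters_key_word] = len(text)
--             elif k == lines_flag:
--                 ret[lines_key_word] = text.count('\n')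
--             elif k == longest_flag:
--                 ret[longest_key_word] = 0 if len(text.splitlines()) == 0 \
--                     else len(max(text.splitlines(), key=lambda string: len(string)))
--             elif k == words_flag:
--                 ret[words_key_word] = len(text.split())
--     return ret
-- ===== SOURCE B (Python) =====
-- def count_util(text: str, flags: str | None = None) -> dict[str, int]:
--     # Metric-centric: flatten the flag tokens (minus each token's first char)
--     # into one option stream, then for each of the four known metrics keep it
--     # iff its letter occurs in the stream, positioned by the letter's first
--     # occurrence; sorting by that position reproduces first-request order.
--     spec = flags if flags is not None and len(flags) != 0 else "-m -l -L -w"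
--     stream = "".join(tok[1:] for tok in spec.split())
--     lines = text.splitlines()
--     metrics = [
--         ("m", "chars", len(text)),
--         ("l", "lines", text.count("\n")),
--         ("L", "longest_line", max(map(len, lines), default=0)),
--         ("w", "words", len(text.split())),
--     ]
--     found = sorted((stream.find(c), key, val) for c, key, val in metrics if c in stream)
--     return {key: val for _, key, val in found}
-- ===== Notes on version B (the rewrite author's own statement) =====
-- stated objective: faster
-- what changed: B is metric-centric instead of flag-character-centric: it flattens the flag tokens into one option stream, keeps each of the four known metrics iff its letter occurs in the stream (computing each metric at most once), and sorts the kept metrics by the letter's first-occurrence position, whereas A loops over every flag character dispatching through an if/elif chain and re-computes and re-inserts a metric on every occurrence.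
import Mathlib
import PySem

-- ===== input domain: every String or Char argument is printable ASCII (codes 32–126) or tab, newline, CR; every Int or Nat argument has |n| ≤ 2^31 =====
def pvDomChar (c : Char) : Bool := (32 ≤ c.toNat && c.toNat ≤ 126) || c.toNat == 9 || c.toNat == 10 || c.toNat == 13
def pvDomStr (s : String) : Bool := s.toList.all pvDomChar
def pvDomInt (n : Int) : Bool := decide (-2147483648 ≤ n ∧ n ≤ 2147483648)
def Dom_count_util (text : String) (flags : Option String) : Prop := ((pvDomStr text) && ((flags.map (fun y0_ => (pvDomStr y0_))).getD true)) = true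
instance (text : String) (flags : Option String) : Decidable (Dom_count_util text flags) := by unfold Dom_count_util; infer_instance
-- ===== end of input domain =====

-- B is metric-centric: it flattens the flag tokens (minus each token's first char) into one
-- option stream, keeps each of the four known metrics iff its letter occurs in the stream,
-- and sorts the kept metrics by the letter's first-occurrence position — instead of A's
-- per-character if/elif dispatch loop that re-inserts a metric on every flag occurrence.


-- ===== PORT A =====
-- the body of A's inner 'for k in flag[1:]' loop, factored as a named step for the fold
def pyAstep (text : String) (d : PySem.Dict String Int) (k : Char) : PySem.Dict String Int :=
  if k = 'm' then d.insert "chars" (PySem.Str.len text)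
  else if k = 'l' then d.insert "lines" ((PySem.Str.count text "\n" : Int))
  else if k = 'L' then
    d.insert "longest_line"
      (if (PySem.Str.splitlines text).length = 0 then 0
       else PySem.Str.len ((PySem.List.max? (PySem.Str.splitlines text) (fun s => PySem.Str.len s)).getD ""))
  else if k = 'w' then d.insert "words" ((PySem.Str.split₀ text).length : Int)
  else d

-- 'flags.split() if flags is not None and len(flags) != 0 else default_flags.split()'
def pyToksA (flags : Option String) : List String :=
  match flags with
  | some f => if PySem.Str.len f ≠ 0 then PySem.Str.split₀ f else PySem.Str.split₀ "-m -l -L -w"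
  | none => PySem.Str.split₀ "-m -l -L -w"

def count_util (text : String) (flags : Option String) : List (String × Int) :=
  let toks : List String := pyToksA flags
  (toks.foldl (fun d flag => ((PySem.Str.slice flag (some 1) none).toList).foldl (pyAstep text) d)
    PySem.Dict.empty).items

-- ===== PORT B =====
-- B's 'metrics' list: (flag letter, key, value) for each of the four known metrics
def pvMetrics (text : String) : List (Char × String × Int) :=
  [('m', "chars", PySem.Str.len text),
   ('l', "lines", (PySem.Str.count text "\n" : Int)),
   ('L', "longest_line", PySem.List.maxD ((PySem.Str.splitlines text).map PySem.Str.len) (fun x => x) 0),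
   ('w', "words", ((PySem.Str.split₀ text).length : Int))]

-- 'flags if flags is not None and len(flags) != 0 else "-m -l -L -w"'
def pySpecB (flags : Option String) : String :=
  match flags with
  | some f => if PySem.Str.len f ≠ 0 then f else "-m -l -L -w"
  | none => "-m -l -L -w"

def count_util_alt (text : String) (flags : Option String) : List (String × Int) :=
  let spec : String := pySpecB flags
  -- "".join(tok[1:] for tok in spec.split()); built on the char-list side (PySem.Chars = exact)
  let stream : List Char :=
    PySem.Chars.join []
      ((PySem.Str.split₀ spec).map (fun tok => (PySem.Str.slice tok (some 1) none).toList))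
  -- sorted((stream.find(c), key, val) for c, key, val in metrics if c in stream);
  -- Python sorts the 3-tuples lexicographically: the third component is determined by the
  -- second, so the (idx, key) pair key of sorted2 realises exactly that comparison
  let found : List (Int × String × Int) :=
    PySem.List.sorted2
      (((pvMetrics text).filter (fun m => PySem.Chars.isIn [m.1] stream)).map
        (fun m => (PySem.Chars.find stream [m.1], m.2.1, m.2.2)))
      (fun t => t.1) (fun t => t.2.1)
  -- {key: val for _, key, val in found}
  (PySem.Dict.ofList (found.map (fun t => t.2))).items

-- ===== PRECONDITION & SPEC =====
def Spec_count_util (text : String) (flags : Option String) (out : List (String × Int)) : Prop := out = count_util_alt text flags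
instance (text : String) (flags : Option String) (out : List (String × Int)) : Decidable (Spec_count_util text flags out) := by unfold Spec_count_util; infer_instance

-- ===== CLAIM (what is proved, stated in full; the proofs are below) =====
def Claim_equal_count_util : Prop := ∀ (text : String) (flags : Option String), Dom_count_util text flags → Spec_count_util text flags (count_util text flags)

-- ===== LEMMAS AND PROOFS =====

lemma mlLw_toList : "mlLw".toList = ['m', 'l', 'L', 'w'] := by decide

-- the key string inserted for a given valid flag letter
def pvKey (c : Char) : String :=
  if c = 'm' then "chars" else if c = 'l' then "lines"
  else if c = 'L' then "longest_line" else "words"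

-- the value A inserts for a given valid flag letter
def pvValA (text : String) (c : Char) : Int :=
  if c = 'm' then PySem.Str.len text
  else if c = 'l' then (PySem.Str.count text "\n" : Int)
  else if c = 'L' then
    (if (PySem.Str.splitlines text).length = 0 then 0
     else PySem.Str.len ((PySem.List.max? (PySem.Str.splitlines text) (fun s => PySem.Str.len s)).getD ""))
  else ((PySem.Str.split₀ text).length : Int)

-- the value B's metrics table carries for a given valid flag letter
def pvValB (text : String) (c : Char) : Int :=
  if c = 'm' then PySem.Str.len text
  else if c = 'l' then (PySem.Str.count text "\n" : Int)
  else if c = 'L' then PySem.List.maxD ((PySem.Str.splitlines text).map PySem.Str.len) (fun x => x) 0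
  else ((PySem.Str.split₀ text).length : Int)

def pvP (text : String) (c : Char) : String × Int := (pvKey c, pvValA text c)

-- first-occurrence position of a char in a list (length if absent)
def pvPos (s : List Char) (c : Char) : Nat := (PySem.List.index? s c).getD s.length

-- proof-model of the first-occurrence order of valid flag letters
def pyBstep (o : List Char) (c : Char) : List Char :=
  if c ∈ "mlLw".toList ∧ c ∉ o then o ++ [c] else o

-- the flattened option stream a token list induces
def pvStream (toks : List String) : List Char :=
  (toks.map (fun tok => (PySem.Str.slice tok (some 1) none).toList)).flatten

lemma pvKey_inj : ∀ c ∈ "mlLw".toList, ∀ c' ∈ "mlLw".toList, pvKey c = pvKey c' → c = c' := by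
  intro c hc c' hc'
  rw [mlLw_toList] at hc hc'
  fin_cases hc <;> fin_cases hc' <;> simp [pvKey]

lemma pyAstep_valid (text : String) (d : PySem.Dict String Int) (c : Char)
    (hc : c ∈ "mlLw".toList) : pyAstep text d c = d.insert (pvKey c) (pvValA text c) := by
  rw [mlLw_toList] at hc
  fin_cases hc <;> rfl

lemma pyAstep_invalid (text : String) (d : PySem.Dict String Int) (c : Char)
    (hc : c ∉ "mlLw".toList) : pyAstep text d c = d := by
  rw [mlLw_toList] at hc
  simp only [List.mem_cons, List.not_mem_nil, or_false, not_or] at hc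
  obtain ⟨h1, h2, h3, h4⟩ := hc
  simp [pyAstep, h1, h2, h3, h4]

-- a first extremal element under key f maps to the first extremal value of the mapped list
lemma max?_map_id {α : Type} (f : α → Int) (xs : List α) (m : α)
    (hm : PySem.List.max? xs f = some m) :
    PySem.List.max? (xs.map f) (fun y => y) = some (f m) := by
  cases hr : PySem.List.max? (xs.map f) (fun y => y) with
  | none =>
    rw [PySem.List.max?_eq_none_iff] at hr
    have := PySem.List.max?_mem hm
    simp [List.map_eq_nil_iff] at hr
    subst hr; simp at this
  | some r =>
    have hrm := PySem.List.max?_mem hr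
    have h1 := PySem.List.max?_isMax hm
    have h2 := PySem.List.max?_isMax hr
    obtain ⟨y, hy, hyr⟩ := List.mem_map.mp hrm
    have hle1 : f m ≤ r := h2 (f m) (List.mem_map.mpr ⟨m, PySem.List.max?_mem hm, rfl⟩)
    have hle2 : r ≤ f m := by rw [← hyr]; exact h1 y hy
    rw [le_antisymm hle1 hle2]

-- A's guarded max(splitlines, key=len) equals B's max over the mapped lengths with default 0
lemma longest_eq (text : String) :
    (if (PySem.Str.splitlines text).length = 0 then (0 : Int)
     else PySem.Str.len ((PySem.List.max? (PySem.Str.splitlines text) (fun s => PySem.Str.len s)).getD ""))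
    = PySem.List.maxD ((PySem.Str.splitlines text).map PySem.Str.len) (fun x => x) 0 := by
  cases h : PySem.Str.splitlines text with
  | nil => simp [PySem.List.maxD, PySem.List.max?]
  | cons x t =>
    cases hm : PySem.List.max? (x :: t) (fun s => PySem.Str.len s) with
    | none => rw [PySem.List.max?_eq_none_iff] at hm; simp at hm
    | some m =>
      rw [PySem.List.maxD, max?_map_id _ _ _ hm]
      simp

lemma valB_eq_valA (text : String) (c : Char) (hc : c ∈ "mlLw".toList) :
    pvValB text c = pvValA text c := by
  rw [mlLw_toList] at hc
  fin_cases hc <;> simp [pvValA, pvValB, ← longest_eq]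

lemma metrics_eq (text : String) :
    pvMetrics text = ("mlLw".toList).map (fun c => (c, pvKey c, pvValB text c)) := by
  rw [mlLw_toList]
  simp [pvMetrics, pvKey, pvValB]

-- "".join with empty separator is concatenation
lemma join_nil_eq_flatten (L : List (List Char)) : PySem.Chars.join [] L = L.flatten := by
  induction L with
  | nil => rfl
  | cons x t ih =>
    cases t with
    | nil => simp [PySem.Chars.join, List.intercalate]
    | cons y u =>
      simp only [PySem.Chars.join, List.intercalate, List.intersperse] at ih ⊢
      simp_all

-- index? facts for members
lemma index?_of_mem {s : List Char} {c : Char} (h : c ∈ s) :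
    PySem.List.index? s c = some (pvPos s c) ∧ pvPos s c < s.length := by
  have hs : (PySem.List.index? s c).isSome := (PySem.List.index?_isSome_iff s c).mpr h
  cases heq : PySem.List.index? s c with
  | none => rw [heq] at hs; simp at hs
  | some k =>
    obtain ⟨hk, _, _⟩ := PySem.List.getElem_of_index?_eq_some heq
    have hp : pvPos s c = k := by unfold pvPos; rw [heq]; rfl
    exact ⟨congrArg some hp.symm, hp ▸ hk⟩

lemma getElem_pvPos {s : List Char} {c : Char} (h : c ∈ s) :
    ∃ hk : pvPos s c < s.length, s[pvPos s c] = c := by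
  obtain ⟨heq, hlt⟩ := index?_of_mem h
  obtain ⟨hk, hget, _⟩ := PySem.List.getElem_of_index?_eq_some heq
  exact ⟨hk, hget⟩

lemma pvPos_append_of_mem {s : List Char} (t : List Char) {c : Char} (h : c ∈ s) :
    pvPos (s ++ t) c = pvPos s c := by
  obtain ⟨heq, _⟩ := index?_of_mem h
  unfold pvPos
  rw [PySem.List.index?_append_of_mem t h, heq]
  rfl

-- [c] is a prefix of a drop iff the char sits there
lemma singleton_prefix_drop (s : List Char) (c : Char) (j : Nat) :
    [c] <+: s.drop j ↔ s[j]? = some c := by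
  rw [← List.head?_drop]
  cases s.drop j with
  | nil => simp
  | cons x t => simp [List.prefix_cons_iff, eq_comm]

-- str.find of a single char present in s is its first-occurrence index
lemma find_singleton {s : List Char} {c : Char} (h : c ∈ s) :
    PySem.Chars.find s [c] = (pvPos s c : Int) := by
  have hne : PySem.Chars.find s [c] ≠ -1 := by
    rw [ne_eq, PySem.Chars.find_eq_neg_one_iff, not_not, List.singleton_infix_iff]
    exact h
  have hspec := PySem.Chars.findFrom_natCast_spec s [c] 0 (by omega)
    (by simpa using hne)
  rw [show ((0 : Nat) : Int) = 0 from rfl, PySem.Chars.findFrom_zero] at hspec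
  obtain ⟨hge, hpre, hmin⟩ := hspec
  rw [singleton_prefix_drop] at hpre
  obtain ⟨heq, hlt⟩ := index?_of_mem h
  obtain ⟨hk, hget, hall⟩ := PySem.List.getElem_of_index?_eq_some heq
  have h1 : ¬ (PySem.Chars.find s [c]).toNat < pvPos s c := by
    intro hcon
    have := hall _ hcon
    have hgt : (PySem.Chars.find s [c]).toNat < s.length := by
      by_contra hge'
      rw [List.getElem?_eq_none (by omega)] at hpre
      simp at hpre
    rw [List.getElem?_eq_getElem hgt] at hpre
    exact this (by simpa using hpre)
  have h2 : ¬ pvPos s c < (PySem.Chars.find s [c]).toNat := by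
    intro hcon
    exact hmin (pvPos s c) (by omega) hcon
      ((singleton_prefix_drop s c (pvPos s c)).mpr (by rw [List.getElem?_eq_getElem hk, hget]))
  omega

lemma isIn_singleton (s : List Char) (c : Char) :
    PySem.Chars.isIn [c] s = decide (c ∈ s) := by
  by_cases h : c ∈ s
  · simp [h, PySem.Chars.isIn_iff_infix, List.singleton_infix_iff]
  · simp only [h, decide_false]
    rw [PySem.Chars.isIn_eq_false_iff, List.singleton_infix_iff]
    exact h

-- invariant of the first-occurrence order of valid flag letters in a stream
lemma orderInv (s : List Char) :
    (∀ c, c ∈ s.foldl pyBstep [] ↔ c ∈ s ∧ c ∈ "mlLw".toList)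
    ∧ (s.foldl pyBstep []).Nodup
    ∧ (s.foldl pyBstep []).Pairwise (fun a b => pvPos s a < pvPos s b) := by
  induction s using List.reverseRecOn with
  | nil => simp
  | append_singleton l c ih =>
    obtain ⟨hmem, hnd, hpw⟩ := ih
    rw [List.foldl_append, List.foldl_cons, List.foldl_nil]
    set o := l.foldl pyBstep [] with ho
    have hsub : ∀ a ∈ o, a ∈ l := fun a ha => ((hmem a).mp ha).1
    have hval : ∀ a ∈ o, a ∈ "mlLw".toList := fun a ha => ((hmem a).mp ha).2
    have hpw' : ∀ (o' : List Char), (∀ a ∈ o', a ∈ l) →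
        o'.Pairwise (fun a b => pvPos l a < pvPos l b) →
        o'.Pairwise (fun a b => pvPos (l ++ [c]) a < pvPos (l ++ [c]) b) := by
      intro o' hs hp
      refine List.Pairwise.imp_of_mem ?_ hp
      intro a b ha hb hab
      rw [pvPos_append_of_mem _ (hs a ha), pvPos_append_of_mem _ (hs b hb)]
      exact hab
    by_cases hc : c ∈ "mlLw".toList ∧ c ∉ o
    · have hcl : c ∉ l := fun hin => hc.2 ((hmem c).mpr ⟨hin, hc.1⟩)
      rw [pyBstep, if_pos hc]
      refine ⟨?_, ?_, ?_⟩
      · intro x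
        simp only [List.mem_append, List.mem_singleton]
        constructor
        · rintro (hx | rfl)
          · exact ⟨Or.inl ((hmem x).mp hx).1, ((hmem x).mp hx).2⟩
          · exact ⟨Or.inr rfl, hc.1⟩
        · rintro ⟨hx | rfl, hv⟩
          · exact Or.inl ((hmem x).mpr ⟨hx, hv⟩)
          · exact Or.inr rfl
      · exact List.Nodup.append hnd (List.nodup_singleton c)
          (by intro a ha hb; rw [List.mem_singleton] at hb; subst hb; exact hc.2 ha)
      · rw [List.pairwise_append]
        refine ⟨hpw' o hsub hpw, List.pairwise_singleton _ _, ?_⟩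
        intro a ha b hb
        rw [List.mem_singleton] at hb
        rw [hb, pvPos_append_of_mem _ (hsub a ha)]
        have hlt := (index?_of_mem (hsub a ha)).2
        have : pvPos (l ++ [c]) c = l.length := by
          unfold pvPos
          rw [PySem.List.index?_append_singleton_self l c hcl]
          rfl
        omega
    · rw [pyBstep, if_neg hc]
      rw [not_and, not_not] at hc
      refine ⟨?_, hnd, hpw' o hsub hpw⟩
      intro x
      rw [hmem x]
      simp only [List.mem_append, List.mem_singleton]
      constructor
      · rintro ⟨hx, hv⟩; exact ⟨Or.inl hx, hv⟩
      · rintro ⟨hx | rfl, hv⟩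
        · exact ⟨hx, hv⟩
        · exact ⟨hsub x (hc hv), hv⟩

-- insertBy only looks at comparisons of the inserted element against the accumulator
lemma insertBy_congr {α : Type} (p q : α → α → Bool) (x : α) (acc : List α)
    (h : ∀ b ∈ acc, p x b = q x b) :
    PySem.List.insertBy p x acc = PySem.List.insertBy q x acc := by
  induction acc with
  | nil => rfl
  | cons y ys ih =>
    rw [show PySem.List.insertBy p x (y::ys)
        = if p x y then x::y::ys else y :: PySem.List.insertBy p x ys from rfl,
      show PySem.List.insertBy q x (y::ys)
        = if q x y then x::y::ys else y :: PySem.List.insertBy q x ys from rfl,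
      h y (by simp), ih (fun b hb => h b (by simp [hb]))]

lemma foldl_insertBy_congr {α : Type} (p q : α → α → Bool) (S : List α)
    (h : ∀ a ∈ S, ∀ b ∈ S, p a b = q a b) :
    ∀ (l acc : List α), (∀ a ∈ l, a ∈ S) → (∀ a ∈ acc, a ∈ S) →
      l.foldl (fun acc x => PySem.List.insertBy p x acc) acc
        = l.foldl (fun acc x => PySem.List.insertBy q x acc) acc := by
  intro l
  induction l with
  | nil => intro acc _ _; rfl
  | cons x t ih =>
    intro acc hl hacc
    rw [List.foldl_cons, List.foldl_cons,
      insertBy_congr p q x acc (fun b hb => h x (hl x (by simp)) b (hacc b hb))]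
    exact ih _ (fun a ha => hl a (by simp [ha]))
      (fun a ha => by
        rcases (PySem.List.mem_insertBy _ _ _ _).mp ha with rfl | ha'
        · exact hl a (by simp)
        · exact hacc a ha')

-- Python's lexicographic sort of the metric triples, given pairwise-distinct first components,
-- is the unique rearrangement strictly increasing in the first component
lemma sorted2_fst_eq (xs ys : List (Int × String × Int))
    (hinj : ∀ a ∈ xs, ∀ b ∈ xs, a.1 = b.1 → a = b)
    (hperm : ys.Perm xs) (hp : ys.Pairwise (fun a b => a.1 < b.1)) :
    PySem.List.sorted2 xs (fun t => t.1) (fun t => t.2.1) = ys := by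
  have hs : PySem.List.sorted2 xs (fun t => t.1) (fun t => t.2.1)
      = PySem.List.sorted xs (fun t => t.1) := by
    show xs.foldl (fun acc x => PySem.List.insertBy
        (fun a b => decide (a.1 < b.1) || (!decide (b.1 < a.1) && decide (a.2.1 < b.2.1))) x acc) []
      = xs.foldl (fun acc x => PySem.List.insertBy (fun a b => decide (a.1 < b.1)) x acc) []
    refine foldl_insertBy_congr _ _ xs ?_ xs [] (fun a ha => ha) (by simp)
    intro a ha b hb
    by_cases hab : a.1 = b.1
    · have : a = b := hinj a ha b hb hab
      subst this
      simp
    · rcases lt_trichotomy a.1 b.1 with h | h | h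
      · simp [h, not_lt.mpr (le_of_lt h)]
      · exact absurd h hab
      · simp [h, not_lt.mpr (le_of_lt h)]
  rw [hs]
  exact PySem.List.sorted_eq_of_perm_of_pairwise_lt xs ys _ hperm hp

-- A-side loop invariant: the dict items stay the image of the first-occurrence order
lemma A_loop (text : String) :
    ∀ (cs : List Char) (d : PySem.Dict String Int) (o : List Char),
      d.items = o.map (pvP text) → o.Nodup → (∀ c ∈ o, c ∈ "mlLw".toList) →
      (cs.foldl (pyAstep text) d).items = (cs.foldl pyBstep o).map (pvP text) := by
  intro cs
  induction cs with
  | nil => intro d o h1 _ _; exact h1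
  | cons c t ih =>
    intro d o h1 h2 h3
    by_cases hv : c ∈ "mlLw".toList
    · by_cases ho : c ∈ o
      · have hB : pyBstep o c = o := by
          unfold pyBstep; rw [if_neg]; intro h; exact h.2 ho
        have hcont : (d.contains (pvKey c)) = true := by
          rw [PySem.Dict.contains_eq_decide_mem_keys]
          simp only [PySem.Dict.keys, h1, List.map_map, decide_eq_true_eq]
          exact List.mem_map.mpr ⟨c, ho, rfl⟩
        have hA : (pyAstep text d c).items = d.items := by
          rw [pyAstep_valid text d c hv, PySem.Dict.items_insert, hcont, if_pos rfl, h1,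
            List.map_map]
          apply List.map_congr_left
          intro a ha
          by_cases hk : pvKey a = pvKey c
          · have : a = c := pvKey_inj a (h3 a ha) c hv hk
            subst this
            simp [pvP]
          · simp [pvP, Function.comp, hk]
        have hAd : pyAstep text d c = d := PySem.Dict.ext hA
        simp only [List.foldl_cons, hB, hAd]
        exact ih d o h1 h2 h3
      · have hB : pyBstep o c = o ++ [c] := by
          unfold pyBstep; rw [if_pos ⟨hv, ho⟩]
        have hcont : (d.contains (pvKey c)) = false := by
          rw [PySem.Dict.contains_eq_decide_mem_keys]
          simp only [PySem.Dict.keys, h1, List.map_map, decide_eq_false_iff_not]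
          intro hmem
          obtain ⟨a, ha, hka⟩ := List.mem_map.mp hmem
          exact ho (pvKey_inj a (h3 a ha) c hv hka ▸ ha)
        have hA : (pyAstep text d c).items = (o ++ [c]).map (pvP text) := by
          rw [pyAstep_valid text d c hv, PySem.Dict.items_insert, hcont, if_neg (by simp), h1]
          simp [pvP]
        simp only [List.foldl_cons, hB]
        refine ih _ _ hA (by
          rw [List.nodup_append]
          refine ⟨h2, List.nodup_singleton c, ?_⟩
          intro a ha b hb heq
          subst heq
          exact ho (List.mem_singleton.mp hb ▸ ha)) ?_
        intro a ha
        rcases List.mem_append.mp ha with h | h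
        · exact h3 a h
        · simp at h; subst h; exact hv
    · have hB : pyBstep o c = o := by
        unfold pyBstep; rw [if_neg]; intro h; exact hv h.1
      simp only [List.foldl_cons, hB, pyAstep_invalid text d c hv]
      exact ih d o h1 h2 h3

-- B's sorted metric list is the first-occurrence order, mapped
lemma B_sorted_eq (text : String) (stream : List Char) :
    (PySem.List.sorted2
      (((pvMetrics text).filter (fun m => PySem.Chars.isIn [m.1] stream)).map
        (fun m => (PySem.Chars.find stream [m.1], m.2.1, m.2.2)))
      (fun t => t.1) (fun t => t.2.1))
    = (stream.foldl pyBstep []).map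
        (fun c => (PySem.Chars.find stream [c], pvKey c, pvValB text c)) := by
  obtain ⟨hmem, hnd, hpw⟩ := orderInv stream
  set o := stream.foldl pyBstep [] with ho
  set g : Char → Int × String × Int :=
    fun c => (PySem.Chars.find stream [c], pvKey c, pvValB text c) with hg
  have hlst : ((pvMetrics text).filter (fun m => PySem.Chars.isIn [m.1] stream)).map
        (fun m => (PySem.Chars.find stream [m.1], m.2.1, m.2.2))
      = (("mlLw".toList).filter (fun c => decide (c ∈ stream))).map g := by
    rw [metrics_eq, List.filter_map, List.map_map]
    congr 1
    apply List.filter_congr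
    intro c _
    exact isIn_singleton stream c
  rw [hlst]
  have homem : ∀ c ∈ o, c ∈ stream := fun c hc => ((hmem c).mp hc).1
  have hoval : ∀ c ∈ o, c ∈ "mlLw".toList := fun c hc => ((hmem c).mp hc).2
  refine sorted2_fst_eq _ _ ?_ ?_ ?_
  · -- first components (first-occurrence indices) are pairwise identifying
    intro a ha b hb hab
    obtain ⟨ca, hca, rfl⟩ := List.mem_map.mp ha
    obtain ⟨cb, hcb, rfl⟩ := List.mem_map.mp hb
    rw [List.mem_filter, decide_eq_true_iff] at hca hcb
    simp only [hg] at hab ⊢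
    rw [find_singleton hca.2, find_singleton hcb.2] at hab
    have hab' : pvPos stream ca = pvPos stream cb := by exact_mod_cast hab
    obtain ⟨hka, hgeta⟩ := getElem_pvPos hca.2
    obtain ⟨hkb, hgetb⟩ := getElem_pvPos hcb.2
    have : ca = cb := by rw [← hgeta, ← hgetb]; congr 1
    rw [this]
  · -- the first-occurrence order is a rearrangement of the filtered metric order
    refine List.Perm.map g ?_
    refine (List.perm_ext_iff_of_nodup hnd (List.Nodup.filter _ (by rw [mlLw_toList]; decide))).mpr ?_
    intro x
    rw [hmem x, List.mem_filter, decide_eq_true_iff]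
    exact ⟨fun ⟨h1, h2⟩ => ⟨h2, h1⟩, fun ⟨h1, h2⟩ => ⟨h2, h1⟩⟩
  · -- and it is strictly increasing in the first-occurrence index
    rw [List.pairwise_map]
    refine List.Pairwise.imp_of_mem ?_ hpw
    intro a b ha hb hab
    simp only [hg]
    rw [find_singleton (homem a ha), find_singleton (homem b hb)]
    exact_mod_cast hab

-- both ports pick the same token list
lemma toksA_eq_split_specB (flags : Option String) :
    pyToksA flags = PySem.Str.split₀ (pySpecB flags) := by
  cases flags with
  | none => rfl
  | some f =>
    simp only [pyToksA, pySpecB]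
    by_cases hf : PySem.Str.len f ≠ 0
    · rw [if_pos hf, if_pos hf]
    · rw [if_neg hf, if_neg hf]

-- both sides, for one token list
lemma result_eq (text : String) (toks : List String) :
    (toks.foldl (fun d flag => ((PySem.Str.slice flag (some 1) none).toList).foldl (pyAstep text) d)
      PySem.Dict.empty).items
    = (PySem.Dict.ofList
        ((PySem.List.sorted2
          (((pvMetrics text).filter (fun m => PySem.Chars.isIn [m.1] (PySem.Chars.join []
            (toks.map (fun tok => (PySem.Str.slice tok (some 1) none).toList))))).map
            (fun m => (PySem.Chars.find (PySem.Chars.join []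
              (toks.map (fun tok => (PySem.Str.slice tok (some 1) none).toList))) [m.1],
              m.2.1, m.2.2)))
          (fun t => t.1) (fun t => t.2.1)).map (fun t => t.2))).items := by
  rw [join_nil_eq_flatten]
  set stream := pvStream toks with hstream
  have hflat : (toks.map (fun tok => (PySem.Str.slice tok (some 1) none).toList)).flatten
      = stream := rfl
  rw [hflat]
  obtain ⟨hmem, hnd, _⟩ := orderInv stream
  set o := stream.foldl pyBstep [] with ho
  have hoval : ∀ c ∈ o, c ∈ "mlLw".toList := fun c hc => ((hmem c).mp hc).2
  -- A's side: nested fold = one fold over the flattened stream, kept as the order image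
  have hAside : (toks.foldl (fun d flag => ((PySem.Str.slice flag (some 1) none).toList).foldl
        (pyAstep text) d) PySem.Dict.empty).items = o.map (pvP text) := by
    have h1 : toks.foldl (fun d flag => ((PySem.Str.slice flag (some 1) none).toList).foldl
          (pyAstep text) d) PySem.Dict.empty
        = stream.foldl (pyAstep text) PySem.Dict.empty := by
      rw [hstream, pvStream, List.foldl_flatten, List.foldl_map]
    rw [h1]
    exact A_loop text stream PySem.Dict.empty [] rfl (by simp) (by simp)
  -- B's side: the sorted metric list is the order image too
  rw [hAside, B_sorted_eq text stream, List.map_map]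
  have hmap : (o.map ((fun t => t.2) ∘ (fun c =>
        ((PySem.Chars.find stream [c] : Int), pvKey c, pvValB text c))))
      = o.map (pvP text) := by
    apply List.map_congr_left
    intro a ha
    simp [pvP, valB_eq_valA text a (hoval a ha)]
  rw [hmap]
  -- the dict built from distinct fresh keys lists exactly its input pairs
  have hfresh := PySem.Dict.items_foldl_insert_fresh (o.map (pvP text))
      (fun p => p.1) (fun p => p.2) PySem.Dict.empty
      (by intro a _; exact PySem.Dict.contains_empty _)
      (by
        rw [List.map_map]
        refine List.Nodup.map_on ?_ hnd
        intro a ha b hb hab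
        simp only [Function.comp_apply, pvP] at hab
        exact pvKey_inj a (hoval a ha) b (hoval b hb) hab)
  rw [show ∀ ps : List (String × Int), PySem.Dict.ofList ps
        = ps.foldl (fun d p => d.insert p.1 p.2) PySem.Dict.empty from fun _ => rfl,
    hfresh]
  simp [PySem.Dict.empty]

-- ===== VERDICT (by name: the statement is the Claim_ definition above) =====
theorem count_util_spec : Claim_equal_count_util := by
  intro text flags _
  show count_util text flags = count_util_alt text flags
  unfold count_util count_util_alt
  rw [toksA_eq_split_specB flags]
  exact result_eq text _
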